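-- pv_equiv track=rewrite | github.com/dgnsrekt/slack-cheat.sh | slack_cheat/api.py | format_message_pagination
-- ===== SOURCE A (Python) =====
-- def format_message_pagination(text, max_characters=1500):
--     """Splits text with lines > the max_characters length into chunks.
--
--     :param text:
--     :returns:
--     """
--     chunks = str()
--     messages = []
--
--     def is_newline_character(char):  # noqa: WPS430
--         if char == "\n":
--             return True
--         return False
--
--     for char in text:
--         chunks += char
--         if len(chunks) > max_characters:
--             if is_newline_character(char):
--                 messages.append(chunks)
--                 chunks = str()
--
--     messages.append(chunks)
--
--     return messages
-- ===== SOURCE B (Python) =====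
-- def format_message_pagination(text, max_characters=1500):
--     """Splits text with lines > the max_characters length into chunks."""
--     positions = [i for i, c in enumerate(text) if c == "\n"]
--     messages = []
--     start = 0
--     for pos in positions:
--         if pos + 1 - start > max_characters:
--             messages.append(text[start:pos + 1])
--             start = pos + 1
--     messages.append(text[start:])
--     return messages
-- ===== Notes on version B (the rewrite author's own statement) =====
-- stated objective: alternative
-- what changed: Replaced A's character-by-character string accumulation (with a per-character length test and flush) by a precomputed table of newline positions iterated with a start cursor, emitting text slices at the flush boundaries.
import Mathlib
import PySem

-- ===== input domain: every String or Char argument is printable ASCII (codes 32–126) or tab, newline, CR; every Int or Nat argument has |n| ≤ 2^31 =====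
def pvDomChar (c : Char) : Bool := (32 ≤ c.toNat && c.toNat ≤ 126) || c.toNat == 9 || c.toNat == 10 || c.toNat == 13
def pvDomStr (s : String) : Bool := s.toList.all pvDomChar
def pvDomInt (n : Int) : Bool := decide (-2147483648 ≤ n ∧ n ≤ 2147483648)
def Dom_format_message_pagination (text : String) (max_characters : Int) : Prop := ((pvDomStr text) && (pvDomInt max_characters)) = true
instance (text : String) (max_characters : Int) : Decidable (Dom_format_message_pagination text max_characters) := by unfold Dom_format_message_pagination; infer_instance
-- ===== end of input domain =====

-- B replaces A's character-by-character accumulation with a precomputed newline-position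
-- table plus slicing (objective: alternative decomposition, same return value).

-- ===== PORT A =====
-- loop body of A's `for char in text`: chunks += char; flush on len>max and newline
def pvStepA (max : Int) (st : List Char × List String) (c : Char) : List Char × List String :=
  let chunks := st.1 ++ [c]
  if (chunks.length : Int) > max then
    if c = '\n' then ([], st.2 ++ [String.ofList chunks]) else (chunks, st.2)
  else (chunks, st.2)

def format_message_pagination (text : String) (max_characters : Int) : List String :=
  let r := text.toList.foldl (pvStepA max_characters) ([], [])
  r.2 ++ [String.ofList r.1]

-- ===== PORT B =====
-- loop body of B's `for pos in positions` (cs is the full text as chars)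
def pvStepB (max : Int) (cs : List Char) (st : Int × List String) (pos : Int) : Int × List String :=
  if pos + 1 - st.1 > max then
    (pos + 1, st.2 ++ [String.ofList (PySem.List.slice cs (some st.1) (some (pos + 1)))])
  else st

def format_message_pagination_alt (text : String) (max_characters : Int) : List String :=
  let cs := text.toList
  let positions := (PySem.List.enumerate cs 0).filterMap (fun ic => if ic.2 = '\n' then some ic.1 else none)
  let r := positions.foldl (pvStepB max_characters cs) (0, [])
  r.2 ++ [String.ofList (PySem.List.slice cs (some r.1) none)]

-- ===== PRECONDITION & SPEC =====
def Spec_format_message_pagination (text : String) (max_characters : Int) (out : List String) : Prop := out = format_message_pagination_alt text max_characters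
instance (text : String) (max_characters : Int) (out : List String) : Decidable (Spec_format_message_pagination text max_characters out) := by unfold Spec_format_message_pagination; infer_instance

-- ===== CLAIM (what is proved, stated in full; the proofs are below) =====
def Claim_equal_format_message_pagination : Prop := ∀ (text : String) (max_characters : Int), Dom_format_message_pagination text max_characters → Spec_format_message_pagination text max_characters (format_message_pagination text max_characters)

-- ===== LEMMAS AND PROOFS =====

-- common reference recursion: greedily accumulate chars, flush after a newline once too long
def pvGo (max : Int) : List Char → List Char → List String
  | acc, [] => [String.ofList acc]
  | acc, c :: rest =>
    if (((acc ++ [c]).length : Int) > max ∧ c = '\n') then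
      String.ofList (acc ++ [c]) :: pvGo max [] rest
    else pvGo max (acc ++ [c]) rest

-- newline positions of cs, counting from off
def pvNlpos : Int → List Char → List Int
  | _, [] => []
  | off, c :: rest => (if c = '\n' then [off] else []) ++ pvNlpos (off + 1) rest

lemma pvA_loop (max : Int) : ∀ (rest acc : List Char) (msgs : List String),
    (rest.foldl (pvStepA max) (acc, msgs)).2
      ++ [String.ofList (rest.foldl (pvStepA max) (acc, msgs)).1]
    = msgs ++ pvGo max acc rest := by
  intro rest
  induction rest with
  | nil => intro acc msgs; simp [pvGo]
  | cons c rest ih =>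
    intro acc msgs
    simp only [List.foldl_cons, pvStepA, pvGo]
    by_cases h1 : ((acc ++ [c]).length : Int) > max
    · by_cases h2 : c = '\n'
      · simp only [if_pos h1, if_pos h2, if_pos (And.intro h1 h2), ih]
        simp
      · simp only [if_pos h1, if_neg h2, ih]
        rw [if_neg (by tauto)]
    · simp only [if_neg h1, ih]
      rw [if_neg (by tauto)]

lemma pvNlpos_enum (cs : List Char) : ∀ (off : Int),
    (PySem.List.enumerate cs off).filterMap (fun ic => if ic.2 = '\n' then some ic.1 else none)
      = pvNlpos off cs := by
  induction cs with
  | nil => intro off; simp [PySem.List.enumerate_nil, pvNlpos]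
  | cons c rest ih =>
    intro off
    by_cases h : c = '\n' <;>
      simp [PySem.List.enumerate_cons, pvNlpos, h, ih]

lemma pv_take_succ_c (full : List Char) (start off : Nat) (c : Char)
    (hs : start ≤ off) (hc : full[off]? = some c) :
    (full.drop start).take (off + 1 - start)
      = (full.drop start).take (off - start) ++ [c] := by
  rw [show off + 1 - start = (off - start) + 1 by omega, List.take_add_one, List.getElem?_drop,
      show start + (off - start) = off by omega, hc]
  rfl

lemma pvB_loop (max : Int) (full : List Char) :
    ∀ (cs : List Char) (off start : Nat) (msgs : List String),
      start ≤ off → full.drop off = cs →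
      (((pvNlpos (off : Int) cs).foldl (pvStepB max full) ((start : Int), msgs)).2
        ++ [String.ofList (PySem.List.slice full
              (some ((pvNlpos (off : Int) cs).foldl (pvStepB max full) ((start : Int), msgs)).1) none)])
      = msgs ++ pvGo max ((full.drop start).take (off - start)) cs := by
  intro cs
  induction cs generalizing full with
  | nil =>
    intro off start msgs hs hd
    have hlen : full.length ≤ off := by
      have := congrArg List.length hd
      simp at this
      omega
    simp only [pvNlpos, List.foldl_nil, pvGo]
    rw [PySem.List.slice_from_natCast]
    rw [List.take_of_length_le (by simp; omega)]
  | cons c rest ih =>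
    intro off start msgs hs hd
    have hofflt : off < full.length := by
      have := congrArg List.length hd
      simp at this
      omega
    have hd1 : full.drop (off + 1) = rest := by
      have := congrArg (List.drop 1) hd
      simpa [List.drop_drop, Nat.add_comm] using this
    have hc : full[off]? = some c := by
      have := congrArg (fun l => l[0]?) hd
      simpa [List.getElem?_drop] using this
    have hcast : ((off : Int) + 1) = ((off + 1 : Nat) : Int) := by push_cast; ring
    have hacclen : ((full.drop start).take (off - start)).length = off - start := by
      simp
      omega
    have hcondeq : ((((full.drop start).take (off - start)) ++ [c]).length : Int) > max
        ↔ (off : Int) + 1 - (start : Int) > max := by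
      simp [hacclen]
      omega
    by_cases hn : c = '\n'
    · have hpos : pvNlpos (off : Int) (c :: rest) = (off : Int) :: pvNlpos ((off : Int) + 1) rest := by
        subst hn; simp [pvNlpos]
      rw [hpos, List.foldl_cons]
      simp only [pvStepB]
      by_cases hC : (off : Int) + 1 - (start : Int) > max
      · rw [if_pos hC]
        have hslice : PySem.List.slice full (some (start : Int)) (some ((off : Int) + 1))
            = (full.drop start).take (off - start) ++ [c] := by
          rw [hcast, PySem.List.slice_natCast]
          exact pv_take_succ_c full start off c hs hc
        rw [hslice, hcast]
        rw [ih full (off + 1) (off + 1)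
              (msgs ++ [String.ofList ((full.drop start).take (off - start) ++ [c])]) le_rfl hd1]
        simp only [pvGo, Nat.sub_self, List.take_zero]
        rw [if_pos ⟨hcondeq.mpr hC, hn⟩]
        simp
      · rw [if_neg hC]
        rw [hcast, ih full (off + 1) start msgs (by omega) hd1]
        simp only [pvGo]
        rw [if_neg (fun h => hC (hcondeq.mp h.1))]
        rw [pv_take_succ_c full start off c hs hc]
    · have hpos : pvNlpos (off : Int) (c :: rest) = pvNlpos ((off : Int) + 1) rest := by
        simp [pvNlpos, hn]
      rw [hpos, hcast, ih full (off + 1) start msgs (by omega) hd1]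
      simp only [pvGo]
      rw [if_neg (fun h => hn h.2)]
      rw [pv_take_succ_c full start off c hs hc]

-- ===== VERDICT (by name: the statement is the Claim_ definition above) =====
theorem format_message_pagination_spec : Claim_equal_format_message_pagination := by
  intro text max _
  unfold Spec_format_message_pagination
  simp only [format_message_pagination, format_message_pagination_alt]
  rw [pvNlpos_enum]
  have hB := pvB_loop max text.toList text.toList 0 0 [] le_rfl (by simp)
  simp only [Nat.cast_zero, Nat.sub_self, List.take_zero, List.nil_append] at hB
  have hA := pvA_loop max text.toList [] []
  simp only [List.nil_append] at hA
  rw [hA, hB]
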